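-- pv_equiv track=rewrite | github.com/a200615006/marathon_pipeline | marathon_rag/src/data_processor/chunking.py | is_content_already_included
-- ===== SOURCE A (Python) =====
-- def is_content_already_included(previous_text: str, current_text: str, max_overlap: int) -> bool:
--     """
--     检查当前分块是否已经包含了前一个分块的内容
--     避免添加重复的重叠
--     """
--     if not previous_text or not current_text:
--         return False
--
--     # 检查当前分块开头是否与前一个分块结尾有重复
--     previous_end = previous_text[-min(max_overlap * 2, len(previous_text)):]  # 检查前一个分块的结尾部分
--     current_start = current_text[:min(max_overlap * 2, len(current_text))]    # 检查当前分块的开头部分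
--
--     # 如果当前分块开头已经包含了前一个分块结尾的内容，就不需要再添加重叠
--     for overlap_length in range(50, min(len(previous_end), len(current_start)) + 1):
--         if previous_end[-overlap_length:] == current_start[:overlap_length]:
--             return True
--
--     return False
-- ===== SOURCE B (Python) =====
-- def is_content_already_included(previous_text: str, current_text: str, max_overlap: int) -> bool:
--     if not previous_text or not current_text:
--         return False
--
--     previous_end = previous_text[-min(max_overlap * 2, len(previous_text)):]
--     current_start = current_text[:min(max_overlap * 2, len(current_text))]
--
--     n = len(current_start)
--     # KMP failure function of current_start
--     pi = [0] * n
--     k = 0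
--     for i in range(1, n):
--         while k > 0 and current_start[i] != current_start[k]:
--             k = pi[k - 1]
--         if current_start[i] == current_start[k]:
--             k += 1
--         pi[i] = k
--     # stream previous_end through the matcher; afterwards k is the length of the
--     # longest prefix of current_start that is a suffix of previous_end
--     k = 0
--     for c in previous_end:
--         while k > 0 and (k == n or current_start[k] != c):
--             k = pi[k - 1]
--         if k < n and current_start[k] == c:
--             k += 1
--     return k >= 50
-- ===== Notes on version B (the rewrite author's own statement) =====
-- stated objective: faster
-- what changed: A tries every overlap length L from 50 upward, building and comparing a fresh suffix/prefix slice pair for each L; B builds the KMP failure function of current_start once and streams previous_end through the KMP matcher, so the final match length is the longest suffix of previous_end that is a prefix of current_start and the answer is just 'that length >= 50'.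
import Mathlib
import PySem

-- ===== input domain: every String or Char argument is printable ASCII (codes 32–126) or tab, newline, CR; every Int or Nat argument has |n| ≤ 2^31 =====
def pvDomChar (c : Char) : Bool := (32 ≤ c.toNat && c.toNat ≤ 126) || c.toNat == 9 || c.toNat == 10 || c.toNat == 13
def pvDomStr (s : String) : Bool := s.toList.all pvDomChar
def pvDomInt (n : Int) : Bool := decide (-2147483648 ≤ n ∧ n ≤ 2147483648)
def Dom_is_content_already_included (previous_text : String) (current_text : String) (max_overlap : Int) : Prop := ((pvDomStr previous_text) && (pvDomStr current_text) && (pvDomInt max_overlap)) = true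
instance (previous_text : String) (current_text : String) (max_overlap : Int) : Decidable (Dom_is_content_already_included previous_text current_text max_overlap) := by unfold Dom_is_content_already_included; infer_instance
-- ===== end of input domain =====

-- B replaces A's quadratic "try every overlap length, building a fresh slice pair for each" loop
-- by the KMP failure function of current_start and one streaming pass over previous_end
-- (objective: faster — worst-case linear instead of quadratic in the compared window).

-- ===== PORT A =====
-- the for-loop over range(50, N+1) with early 'return True'
def aScan (pe cs : List Char) : Bool :=
  (PySem.List.pyRange 50 ((min pe.length cs.length : Int) + 1) 1).any
    (fun L => PySem.List.slice pe (some (-L)) none == PySem.List.slice cs none (some L))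

def is_content_already_included (previous_text : String) (current_text : String) (max_overlap : Int) : Bool :=
  if previous_text.toList.isEmpty || current_text.toList.isEmpty then false
  else
    let previous_end := PySem.List.slice previous_text.toList
      (some (-(min (max_overlap * 2) (previous_text.toList.length : Int)))) none
    let current_start := PySem.List.slice current_text.toList
      none (some (min (max_overlap * 2) (current_text.toList.length : Int)))
    aScan previous_end current_start

-- ===== PORT B =====
-- 'while k > 0 and bad(k): k = pi[k-1]'; the fuel argument (called with fuel = k) only makes it total
def kmpFall (pi : List Nat) (bad : Nat → Bool) : Nat → Nat → Nat
  | 0, k => k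
  | fuel + 1, k => if 0 < k ∧ bad k = true then kmpFall pi bad fuel (pi.getD (k - 1) 0) else k

-- 'for i in range(1, n)' of the failure-function construction; cnt counts the remaining iterations
def buildPiLoop (cs : List Char) : Nat → List Nat → Nat → Nat → List Nat
  | 0, pi, _, _ => pi
  | cnt + 1, pi, k, i =>
    let k1 := kmpFall pi (fun j => !(cs[i]? == cs[j]?)) k k
    let k2 := if cs[i]? == cs[k1]? then k1 + 1 else k1
    buildPiLoop cs cnt (pi.set i k2) k2 (i + 1)

def buildPi (cs : List Char) : List Nat :=
  buildPiLoop cs (cs.length - 1) (List.replicate cs.length 0) 0 1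

-- one step of 'for c in previous_end: while …; if k < n and cs[k] == c: k += 1'
def bMatchStep (cs : List Char) (pi : List Nat) (k : Nat) (c : Char) : Nat :=
  let k1 := kmpFall pi (fun j => decide (j = cs.length) || !(cs[j]? == some c)) k k
  if k1 < cs.length ∧ cs[k1]? = some c then k1 + 1 else k1

def bScan (cs pe : List Char) : Bool :=
  decide (50 ≤ pe.foldl (bMatchStep cs (buildPi cs)) 0)

def is_content_already_included_alt (previous_text : String) (current_text : String) (max_overlap : Int) : Bool :=
  if previous_text.toList.isEmpty || current_text.toList.isEmpty then false
  else
    let previous_end := PySem.List.slice previous_text.toList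
      (some (-(min (max_overlap * 2) (previous_text.toList.length : Int)))) none
    let current_start := PySem.List.slice current_text.toList
      none (some (min (max_overlap * 2) (current_text.toList.length : Int)))
    bScan current_start previous_end

-- ===== PRECONDITION & SPEC =====
def Spec_is_content_already_included (previous_text : String) (current_text : String) (max_overlap : Int) (out : Bool) : Prop := out = is_content_already_included_alt previous_text current_text max_overlap
instance (previous_text : String) (current_text : String) (max_overlap : Int) (out : Bool) : Decidable (Spec_is_content_already_included previous_text current_text max_overlap out) := by unfold Spec_is_content_already_included; infer_instance

-- ===== CLAIM (what is proved, stated in full; the proofs are below) =====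
def Claim_equal_is_content_already_included : Prop := ∀ (previous_text : String) (current_text : String) (max_overlap : Int), Dom_is_content_already_included previous_text current_text max_overlap → Spec_is_content_already_included previous_text current_text max_overlap (is_content_already_included previous_text current_text max_overlap)

-- ===== LEMMAS AND PROOFS =====

-- "the prefix of cs of length L is a suffix of t"
abbrev MatchP (cs t : List Char) (L : Nat) : Prop :=
  L ≤ cs.length ∧ L ≤ t.length ∧ cs.take L = t.drop (t.length - L)

-- "j is the length of a proper border of s"
abbrev Brd (s : List Char) (j : Nat) : Prop :=
  j < s.length ∧ s.take j = s.drop (s.length - j)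

def maxM (cs t : List Char) : Nat := Nat.findGreatest (MatchP cs t) (min cs.length t.length)

def maxBrd (s : List Char) : Nat := Nat.findGreatest (Brd s) (s.length - 1)

-- extending a suffix-prefix match by one character
lemma match_snoc (cs t : List Char) (c : Char) (k : Nat) (hkt : k ≤ t.length) (hkc : k < cs.length) :
    cs.take (k+1) = (t ++ [c]).drop (t.length + 1 - (k+1)) ↔
      (cs.take k = t.drop (t.length - k) ∧ cs[k]? = some c) := by
  have h1 : t.length + 1 - (k+1) = t.length - k := by omega
  rw [List.take_add_one, h1, List.drop_append_of_le_length (by omega),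
      List.getElem?_eq_getElem hkc]
  simp only [Option.toList_some]
  rw [← List.concat_eq_append, ← List.concat_eq_append, List.concat_inj]
  simp

-- the same suffix taken through a longer matching suffix
lemma drop_eq_of_match (u t : List Char) (j k : Nat) (hjk : j ≤ k) (hk : k ≤ t.length)
    (h : u.take k = t.drop (t.length - k)) :
    t.drop (t.length - j) = (u.take k).drop (k - j) := by
  rw [h, List.drop_drop]
  congr 1
  omega

lemma brd_trans (s : List Char) (b j : Nat) (hb : Brd s b) (hj : Brd (s.take b) j) : Brd s j := by
  obtain ⟨hb1, hb2⟩ := hb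
  obtain ⟨hj1, hj2⟩ := hj
  have hbl : (s.take b).length = b := by rw [List.length_take]; omega
  rw [hbl] at hj1 hj2
  have h1 : (s.take b).take j = s.take j := by rw [List.take_take, min_eq_left (by omega)]
  have h2 := drop_eq_of_match s s j b (by omega) (by omega) hb2
  exact ⟨by omega, by rw [← h1, hj2, ← h2]⟩

lemma brd_chain (s : List Char) (b j : Nat) (hb : Brd s b) (hj : Brd s j) (hlt : j < b) :
    Brd (s.take b) j := by
  obtain ⟨hb1, hb2⟩ := hb
  obtain ⟨hj1, hj2⟩ := hj
  have hbl : (s.take b).length = b := by rw [List.length_take]; omega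
  have h1 : (s.take b).take j = s.take j := by rw [List.take_take, min_eq_left (by omega)]
  have h2 := drop_eq_of_match s s j b (by omega) (by omega) hb2
  exact ⟨by omega, by rw [hbl, h1, hj2, h2]⟩

lemma brd_zero (s : List Char) (h : s ≠ []) : Brd s 0 :=
  ⟨List.length_pos_iff.mpr h, by simp⟩

lemma maxBrd_brd (s : List Char) (h : s ≠ []) : Brd s (maxBrd s) :=
  Nat.findGreatest_spec (Nat.zero_le _) (brd_zero s h)

lemma maxBrd_le (s : List Char) : maxBrd s ≤ s.length - 1 := Nat.findGreatest_le _

lemma le_maxBrd (s : List Char) (j : Nat) (hj : Brd s j) : j ≤ maxBrd s :=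
  Nat.le_findGreatest (by have := hj.1; omega) hj

lemma brd_iff_chain (s : List Char) (h : s ≠ []) (j : Nat) :
    Brd s j ↔ (j = maxBrd s ∨ Brd (s.take (maxBrd s)) j) := by
  constructor
  · intro hj
    rcases eq_or_lt_of_le (le_maxBrd s j hj) with heq | hlt
    · exact Or.inl heq
    · exact Or.inr (brd_chain s (maxBrd s) j (maxBrd_brd s h) hj hlt)
  · rintro (rfl | hbrd)
    · exact maxBrd_brd s h
    · exact brd_trans s (maxBrd s) j (maxBrd_brd s h) hbrd

-- specification of the fallback chain: it finds the greatest good length in the border chain of k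
lemma kmpFall_spec (cs : List Char) (pi : List Nat) (bad : Nat → Bool) :
    ∀ (fuel k : Nat), k ≤ fuel → k ≤ cs.length →
    (∀ m, 1 ≤ m → m ≤ k → pi.getD (m - 1) 0 = maxBrd (cs.take m)) →
    (kmpFall pi bad fuel k = 0 ∨
      ((kmpFall pi bad fuel k = k ∨ Brd (cs.take k) (kmpFall pi bad fuel k)) ∧
        bad (kmpFall pi bad fuel k) = false)) ∧
    kmpFall pi bad fuel k ≤ k ∧
    (∀ j, (j = k ∨ Brd (cs.take k) j) → bad j = false → j ≤ kmpFall pi bad fuel k) := by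
  intro fuel
  induction fuel with
  | zero =>
    intro k hfuel _ _
    have hk0 : k = 0 := by omega
    subst hk0
    refine ⟨Or.inl rfl, le_rfl, ?_⟩
    rintro j (rfl | hbrd) _
    · exact le_rfl
    · have := hbrd.1; simp at this
  | succ fuel ih =>
    intro k hfuel hk hpi
    by_cases h0 : 0 < k ∧ bad k = true
    · have hstep : kmpFall pi bad (fuel+1) k = kmpFall pi bad fuel (pi.getD (k-1) 0) := by
        rw [kmpFall, if_pos h0]
      have hk1 : pi.getD (k-1) 0 = maxBrd (cs.take k) := hpi k (by omega) le_rfl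
      have htl : (cs.take k).length = k := by rw [List.length_take]; omega
      have hne : cs.take k ≠ [] := by
        intro hcon
        rw [hcon] at htl
        simp at htl
        omega
      have hbk1 : Brd (cs.take k) (pi.getD (k-1) 0) := by
        rw [hk1]; exact maxBrd_brd _ hne
      have hk1lt : pi.getD (k-1) 0 < k := by have := hbk1.1; omega
      have hrec := ih (pi.getD (k-1) 0) (by omega) (by omega)
        (fun m h1 h2 => hpi m h1 (by omega))
      rw [hstep]
      set r := kmpFall pi bad fuel (pi.getD (k-1) 0) with hr
      obtain ⟨hr1, hr2, hr3⟩ := hrec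
      have htk1 : (cs.take k).take (pi.getD (k-1) 0) = cs.take (pi.getD (k-1) 0) := by
        rw [List.take_take, min_eq_left (by omega)]
      refine ⟨?_, by omega, ?_⟩
      · rcases hr1 with h | ⟨hin, hbadr⟩
        · exact Or.inl h
        · refine Or.inr ⟨Or.inr ?_, hbadr⟩
          rcases hin with heq | hbrd
          · rw [heq]; exact hbk1
          · exact brd_trans _ _ r hbk1 (by rwa [htk1])
      · rintro j (rfl | hbrd) hbadj
        · rw [hbadj] at h0; exact absurd h0.2 (by simp)
        · have hjk1 : j ≤ pi.getD (k-1) 0 := by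
            rw [hk1]; exact le_maxBrd _ j hbrd
          have hjin : j = pi.getD (k-1) 0 ∨ Brd (cs.take (pi.getD (k-1) 0)) j := by
            rcases eq_or_lt_of_le hjk1 with heq | hlt
            · exact Or.inl heq
            · right
              have h' := brd_chain (cs.take k) (pi.getD (k-1) 0) j hbk1 hbrd hlt
              rwa [htk1] at h'
          exact hr3 j hjin hbadj
    · have hstep : kmpFall pi bad (fuel+1) k = k := by rw [kmpFall, if_neg h0]
      rw [hstep]
      refine ⟨?_, le_rfl, ?_⟩
      · by_cases hk0 : k = 0
        · exact Or.inl hk0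
        · have hbk : bad k = false := by
            rcases Bool.eq_false_or_eq_true (bad k) with h | h
            · exact absurd ⟨by omega, h⟩ h0
            · exact h
          exact Or.inr ⟨Or.inl rfl, hbk⟩
      · rintro j (rfl | hbrd) _
        · exact le_rfl
        · have := hbrd.1
          rw [List.length_take] at this
          omega

lemma matchP_zero (cs t : List Char) : MatchP cs t 0 :=
  ⟨Nat.zero_le _, Nat.zero_le _, by simp⟩

lemma maxM_matchP (cs t : List Char) : MatchP cs t (maxM cs t) :=
  Nat.findGreatest_spec (Nat.zero_le _) (matchP_zero cs t)

lemma le_maxM (cs t : List Char) (j : Nat) (h : MatchP cs t j) : j ≤ maxM cs t :=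
  Nat.le_findGreatest (le_min h.1 h.2.1) h

lemma match_iff_chain (cs t : List Char) (j : Nat) :
    MatchP cs t j ↔ (j = maxM cs t ∨ Brd (cs.take (maxM cs t)) j) := by
  obtain ⟨hkn, hkt, hkeq⟩ := maxM_matchP cs t
  have htl : (cs.take (maxM cs t)).length = maxM cs t := by rw [List.length_take]; omega
  constructor
  · intro hM
    rcases eq_or_lt_of_le (le_maxM cs t j hM) with heq | hlt
    · exact Or.inl heq
    · right
      have h1 : (cs.take (maxM cs t)).take j = cs.take j := by
        rw [List.take_take, min_eq_left (by omega)]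
      have h2 := drop_eq_of_match cs t j (maxM cs t) (by omega) hkt hkeq
      exact ⟨by omega, by rw [htl, h1, hM.2.2, h2]⟩
  · rintro (heq | hbrd)
    · rw [heq]; exact ⟨hkn, hkt, hkeq⟩
    · obtain ⟨hj1, hj2⟩ := hbrd
      rw [htl] at hj1
      have h1 : (cs.take (maxM cs t)).take j = cs.take j := by
        rw [List.take_take, min_eq_left (by omega)]
      have h2 := drop_eq_of_match cs t j (maxM cs t) (by omega) hkt hkeq
      refine ⟨by omega, by omega, ?_⟩
      rw [← h1, hj2, htl, h2]

lemma matchP_snoc_iff (cs t : List Char) (c : Char) (j : Nat) :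
    MatchP cs (t ++ [c]) (j+1) ↔ (MatchP cs t j ∧ cs[j]? = some c) := by
  have hlen : (t ++ [c]).length = t.length + 1 := by simp
  constructor
  · rintro ⟨h1, h2, h3⟩
    rw [hlen] at h2 h3
    have hj : j < cs.length := by omega
    have hjt : j ≤ t.length := by omega
    rw [match_snoc cs t c j hjt hj] at h3
    exact ⟨⟨by omega, hjt, h3.1⟩, h3.2⟩
  · rintro ⟨⟨h1, h2, h3⟩, hc⟩
    have hj : j < cs.length := by
      by_contra h
      rw [List.getElem?_eq_none (by omega)] at hc
      exact absurd hc (by simp)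
    refine ⟨by omega, by rw [hlen]; omega, ?_⟩
    rw [hlen, match_snoc cs t c j h2 hj]
    exact ⟨h3, hc⟩

lemma maxM_nil (cs : List Char) : maxM cs [] = 0 := by
  have h : maxM cs [] ≤ min cs.length ([] : List Char).length :=
    Nat.findGreatest_le (P := MatchP cs []) _
  simp only [List.length_nil] at h
  omega

-- one matcher step computes the new maximal match length
lemma bMatchStep_maxM (cs t : List Char) (c : Char) (pi : List Nat)
    (hpi : ∀ m, 1 ≤ m → m ≤ cs.length → pi.getD (m-1) 0 = maxBrd (cs.take m)) :
    bMatchStep cs pi (maxM cs t) c = maxM cs (t ++ [c]) := by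
  have hkn : maxM cs t ≤ cs.length := (maxM_matchP cs t).1
  have hbadiff : ∀ j, j ≤ cs.length →
      ((fun j => decide (j = cs.length) || !(cs[j]? == some c)) j = false ↔ cs[j]? = some c) := by
    intro j hj
    simp only [Bool.or_eq_false_iff, Bool.not_eq_false', beq_iff_eq, decide_eq_false_iff_not]
    constructor
    · exact fun h => h.2
    · intro h
      refine ⟨?_, h⟩
      intro heq
      rw [heq, List.getElem?_eq_none le_rfl] at h
      exact absurd h (by simp)
  obtain ⟨hs1, hs2, hs3⟩ := kmpFall_spec cs pi _ (maxM cs t) (maxM cs t) le_rfl hkn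
    (fun m h1 h2 => hpi m h1 (by omega))
  set r := kmpFall pi (fun j => decide (j = cs.length) || !(cs[j]? == some c)) (maxM cs t) (maxM cs t) with hrdef
  have hMr : MatchP cs t r := by
    rcases hs1 with h | ⟨hin, _⟩
    · rw [h]; exact matchP_zero cs t
    · exact (match_iff_chain cs t r).mpr hin
  by_cases hgood : cs[r]? = some c
  · have hrn : r < cs.length := by
      by_contra h
      rw [List.getElem?_eq_none (by omega)] at hgood
      exact absurd hgood (by simp)
    have hstep : bMatchStep cs pi (maxM cs t) c = r + 1 := by
      rw [bMatchStep, ← hrdef, if_pos ⟨hrn, hgood⟩]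
    rw [hstep]
    have hMr1 : MatchP cs (t ++ [c]) (r+1) := (matchP_snoc_iff cs t c r).mpr ⟨hMr, hgood⟩
    have hub : ∀ j, MatchP cs (t ++ [c]) j → j ≤ r + 1 := by
      intro j hj
      cases j with
      | zero => omega
      | succ j' =>
        obtain ⟨hMj, hcj⟩ := (matchP_snoc_iff cs t c j').mp hj
        have hle := hs3 j' ((match_iff_chain cs t j').mp hMj)
          ((hbadiff j' hMj.1).mpr hcj)
        omega
    exact Nat.le_antisymm (le_maxM cs (t ++ [c]) (r+1) hMr1) (hub _ (maxM_matchP cs (t ++ [c])))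
  · have hr0 : r = 0 := by
      rcases hs1 with h | ⟨_, hbf⟩
      · exact h
      · exact absurd ((hbadiff r (by omega)).mp hbf) hgood
    have hstep : bMatchStep cs pi (maxM cs t) c = r := by
      rw [bMatchStep, ← hrdef, if_neg]
      rintro ⟨_, hc2⟩
      exact hgood hc2
    rw [hstep, hr0]
    by_contra hne
    obtain ⟨j', hj'⟩ : ∃ j', maxM cs (t ++ [c]) = j' + 1 :=
      ⟨maxM cs (t ++ [c]) - 1, by omega⟩
    have hM := maxM_matchP cs (t ++ [c])
    rw [hj'] at hM
    obtain ⟨hMj, hcj⟩ := (matchP_snoc_iff cs t c j').mp hM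
    have hle := hs3 j' ((match_iff_chain cs t j').mp hMj) ((hbadiff j' hMj.1).mpr hcj)
    rw [hr0] at hle
    have hj0 : j' = 0 := by omega
    rw [hj0] at hcj
    rw [hr0] at hgood
    exact hgood hcj

lemma foldl_bMatchStep (cs pe : List Char) (pi : List Nat)
    (hpi : ∀ m, 1 ≤ m → m ≤ cs.length → pi.getD (m-1) 0 = maxBrd (cs.take m)) :
    pe.foldl (bMatchStep cs pi) 0 = maxM cs pe := by
  induction pe using List.reverseRecOn with
  | nil => simp [maxM_nil]
  | append_singleton t c ih =>
    rw [List.foldl_append, List.foldl_cons, List.foldl_nil, ih, bMatchStep_maxM cs t c pi hpi]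

-- MatchP against a prefix of cs is "equal or a border"
lemma matchP_take_iff (cs : List Char) (i r : Nat) (hi : i ≤ cs.length) :
    MatchP cs (cs.take i) r ↔ (r = i ∨ Brd (cs.take i) r) := by
  have hl : (cs.take i).length = i := by rw [List.length_take]; omega
  constructor
  · rintro ⟨h1, h2, h3⟩
    rw [hl] at h2 h3
    rcases eq_or_lt_of_le h2 with heq | hlt
    · exact Or.inl heq
    · right
      have ht : (cs.take i).take r = cs.take r := by rw [List.take_take, min_eq_left (by omega)]
      exact ⟨by omega, by rw [hl, ht, h3]⟩
  · rintro (rfl | ⟨h1, h2⟩)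
    · exact ⟨hi, by rw [hl], by rw [hl]; simp⟩
    · rw [hl] at h1 h2
      have ht : (cs.take i).take r = cs.take r := by rw [List.take_take, min_eq_left (by omega)]
      exact ⟨by omega, by rw [hl]; omega, by rw [← ht, h2, hl]⟩

-- a nonzero border of cs.take (i+1), decomposed through the last character
lemma brd_take_snoc_iff (cs : List Char) (i : Nat) (hi : i < cs.length) (j : Nat) :
    Brd (cs.take (i+1)) (j+1) ↔
      (j < i ∧ MatchP cs (cs.take i) j ∧ cs[j]? = cs[i]?) := by
  have htk : cs.take (i+1) = cs.take i ++ [cs[i]] := by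
    rw [List.take_add_one, List.getElem?_eq_getElem hi]
    rfl
  have hl1 : (cs.take (i+1)).length = i+1 := by rw [List.length_take]; omega
  have hli : (cs.take i).length = i := by rw [List.length_take]; omega
  constructor
  · rintro ⟨h1, h2⟩
    rw [hl1] at h1 h2
    have hj : j < i := by omega
    have ht : (cs.take (i+1)).take (j+1) = cs.take (j+1) := by
      rw [List.take_take, min_eq_left (by omega)]
    rw [ht, htk] at h2
    rw [show i + 1 - (j+1) = (cs.take i).length + 1 - (j+1) by omega] at h2
    rw [match_snoc cs (cs.take i) (cs[i]) j (by omega) (by omega)] at h2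
    refine ⟨hj, ⟨by omega, by rw [hli]; omega, h2.1⟩, ?_⟩
    rw [List.getElem?_eq_getElem hi]
    exact h2.2
  · rintro ⟨hj, ⟨hm1, hm2, hm3⟩, hc⟩
    rw [hli] at hm2
    rw [List.getElem?_eq_getElem hi] at hc
    refine ⟨by rw [hl1]; omega, ?_⟩
    have ht : (cs.take (i+1)).take (j+1) = cs.take (j+1) := by
      rw [List.take_take, min_eq_left (by omega)]
    rw [hl1, ht, htk]
    rw [show i + 1 - (j+1) = (cs.take i).length + 1 - (j+1) by omega]
    rw [match_snoc cs (cs.take i) (cs[i]) j (by omega) (by omega)]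
    exact ⟨hm3, hc⟩

lemma maxBrd_take_one (cs : List Char) : maxBrd (cs.take 1) = 0 := by
  have h := Nat.findGreatest_le (P := Brd (cs.take 1)) ((cs.take 1).length - 1)
  have : (cs.take 1).length ≤ 1 := by rw [List.length_take]; omega
  unfold maxBrd
  omega

-- one failure-function step computes maxBrd of the next prefix
lemma buildStep_maxBrd (cs : List Char) (i : Nat) (hi1 : 1 ≤ i) (hi : i < cs.length)
    (pi : List Nat)
    (hpi : ∀ m, 1 ≤ m → m ≤ maxBrd (cs.take i) → pi.getD (m-1) 0 = maxBrd (cs.take m)) :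
    (if cs[i]? == cs[kmpFall pi (fun j => !(cs[i]? == cs[j]?)) (maxBrd (cs.take i)) (maxBrd (cs.take i))]?
     then kmpFall pi (fun j => !(cs[i]? == cs[j]?)) (maxBrd (cs.take i)) (maxBrd (cs.take i)) + 1
     else kmpFall pi (fun j => !(cs[i]? == cs[j]?)) (maxBrd (cs.take i)) (maxBrd (cs.take i))) =
      maxBrd (cs.take (i+1)) := by
  have hli : (cs.take i).length = i := by rw [List.length_take]; omega
  have hne : cs.take i ≠ [] := by
    intro hcon; rw [hcon] at hli; simp at hli; omega
  have hkb : maxBrd (cs.take i) ≤ i - 1 := by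
    have := maxBrd_le (cs.take i); omega
  have hbadiff : ∀ j : Nat, ((fun j : Nat => !(cs[i]? == cs[j]?)) j = false ↔ cs[j]? = cs[i]?) := by
    intro j
    show (!(cs[i]? == cs[j]?)) = false ↔ cs[j]? = cs[i]?
    rw [Bool.not_eq_false', beq_iff_eq]
    exact eq_comm
  obtain ⟨hs1, hs2, hs3⟩ := kmpFall_spec cs pi _ (maxBrd (cs.take i)) (maxBrd (cs.take i))
    le_rfl (by omega) hpi
  set r := kmpFall pi (fun j => !(cs[i]? == cs[j]?)) (maxBrd (cs.take i)) (maxBrd (cs.take i)) with hrdef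
  have htk : (cs.take i).take (maxBrd (cs.take i)) = cs.take (maxBrd (cs.take i)) := by
    rw [List.take_take, min_eq_left (by omega)]
  -- the chain of maxBrd (take i) is exactly the border set of take i
  have hchain : ∀ j, (j = maxBrd (cs.take i) ∨ Brd (cs.take (maxBrd (cs.take i))) j) ↔
      Brd (cs.take i) j := by
    intro j
    rw [brd_iff_chain (cs.take i) hne j, htk]
  have hl1 : (cs.take (i+1)).length = i + 1 := by rw [List.length_take]; omega
  have hne1 : cs.take (i+1) ≠ [] := by
    intro hcon; rw [hcon] at hl1; simp at hl1
  have hMr : MatchP cs (cs.take i) r := by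
    rcases hs1 with h | ⟨hin, _⟩
    · rw [h]; exact matchP_zero cs (cs.take i)
    · exact (matchP_take_iff cs i r (by omega)).mpr (Or.inr ((hchain r).mp hin))
  by_cases hgood : cs[r]? = cs[i]?
  · rw [if_pos (by rw [beq_iff_eq]; exact hgood.symm)]
    -- r+1 is a border of take (i+1), and it is maximal
    have hB : Brd (cs.take (i+1)) (r+1) :=
      (brd_take_snoc_iff cs i hi r).mpr ⟨by omega, hMr, hgood⟩
    have hub : ∀ j, Brd (cs.take (i+1)) j → j ≤ r + 1 := by
      intro j hj
      cases j with
      | zero => omega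
      | succ j' =>
        obtain ⟨hjlt, hMj, hcj⟩ := (brd_take_snoc_iff cs i hi j').mp hj
        have hin : j' = maxBrd (cs.take i) ∨ Brd (cs.take (maxBrd (cs.take i))) j' := by
          rcases (matchP_take_iff cs i j' (by omega)).mp hMj with heq | hbrd
          · omega
          · exact (hchain j').mpr hbrd
        have := hs3 j' hin ((hbadiff j').mpr hcj)
        omega
    exact Nat.le_antisymm (le_maxBrd _ _ hB) (hub _ (maxBrd_brd _ hne1))
  · rw [if_neg (by rw [beq_iff_eq]; exact fun h => hgood h.symm)]
    have hr0 : r = 0 := by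
      rcases hs1 with h | ⟨_, hbf⟩
      · exact h
      · exact absurd ((hbadiff r).mp hbf) hgood
    rw [hr0]
    by_contra hne'
    obtain ⟨j', hj'⟩ : ∃ j', maxBrd (cs.take (i+1)) = j' + 1 :=
      ⟨maxBrd (cs.take (i+1)) - 1, by omega⟩
    have hB := maxBrd_brd (cs.take (i+1)) hne1
    rw [hj'] at hB
    obtain ⟨hjlt, hMj, hcj⟩ := (brd_take_snoc_iff cs i hi j').mp hB
    have hin : j' = maxBrd (cs.take i) ∨ Brd (cs.take (maxBrd (cs.take i))) j' := by
      rcases (matchP_take_iff cs i j' (by omega)).mp hMj with heq | hbrd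
      · omega
      · exact (hchain j').mpr hbrd
    have hle := hs3 j' hin ((hbadiff j').mpr hcj)
    rw [hr0] at hle
    have hj0 : j' = 0 := by omega
    rw [hj0] at hcj
    rw [hr0] at hgood
    exact hgood hcj

lemma buildPiLoop_spec (cs : List Char) :
    ∀ (cnt i : Nat) (pi : List Nat) (k : Nat),
      1 ≤ i → i + cnt = cs.length → pi.length = cs.length →
      k = maxBrd (cs.take i) →
      (∀ m, m < i → pi.getD m 0 = maxBrd (cs.take (m+1))) →
      ∀ m, m < cs.length → (buildPiLoop cs cnt pi k i).getD m 0 = maxBrd (cs.take (m+1)) := by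
  intro cnt
  induction cnt with
  | zero =>
    intro i pi k hi hicnt _ _ hinv m hm
    rw [buildPiLoop]
    exact hinv m (by omega)
  | succ cnt ih =>
    intro i pi k hi hicnt hlen hk hinv m hm
    rw [buildPiLoop]
    have hilt : i < cs.length := by omega
    have hstep := buildStep_maxBrd cs i hi hilt pi
      (by
        intro m' h1 h2
        have hb : maxBrd (cs.take i) ≤ i - 1 := by
          have h' := maxBrd_le (cs.take i)
          rw [List.length_take, min_eq_left (by omega)] at h'
          exact h'
        rw [hk] at *
        have : m' - 1 < i := by omega
        have := hinv (m' - 1) this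
        rw [show m' - 1 + 1 = m' by omega] at this
        exact this)
    rw [hk]
    refine ih (i+1) _ _ (by omega) (by omega) (by rw [List.length_set]; exact hlen)
      (by rw [hstep]) ?_ m hm
    intro m' hm'
    by_cases hmi : m' = i
    · subst hmi
      rw [List.getD_eq_getElem?_getD, List.getElem?_set_self (by omega), Option.getD_some, hstep]
    · rw [List.getD_eq_getElem?_getD, List.getElem?_set_ne (by omega), ← List.getD_eq_getElem?_getD]
      exact hinv m' (by omega)

lemma buildPi_spec (cs : List Char) :
    ∀ m, 1 ≤ m → m ≤ cs.length → (buildPi cs).getD (m-1) 0 = maxBrd (cs.take m) := by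
  intro m h1 h2
  have h := buildPiLoop_spec cs (cs.length - 1) 1 (List.replicate cs.length 0) 0
    le_rfl (by omega) (by simp) (by rw [maxBrd_take_one])
    (by
      intro m' hm'
      have hm0 : m' = 0 := by omega
      subst hm0
      rw [List.getD_eq_getElem?_getD, List.getElem?_replicate_of_lt (by omega)]
      simp [maxBrd_take_one])
    (m-1) (by omega)
  rw [buildPi]
  rw [show m - 1 + 1 = m by omega] at h
  exact h

lemma bScan_iff (cs pe : List Char) :
    bScan cs pe = true ↔
      ∃ k : Nat, 50 ≤ k ∧ k ≤ pe.length ∧ k ≤ cs.length ∧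
        cs.take k = pe.drop (pe.length - k) := by
  unfold bScan
  rw [foldl_bMatchStep cs pe (buildPi cs) (buildPi_spec cs), decide_eq_true_eq]
  constructor
  · intro h
    obtain ⟨h1, h2, h3⟩ := maxM_matchP cs pe
    exact ⟨maxM cs pe, h, h2, h1, h3⟩
  · rintro ⟨k, h50, h1, h2, h3⟩
    exact le_trans h50 (le_maxM cs pe k ⟨h2, h1, h3⟩)

-- A's loop is the search for such a match length in [50, min]
lemma aScan_iff (pe cs : List Char) :
    aScan pe cs = true ↔
      ∃ k : Nat, 50 ≤ k ∧ k ≤ pe.length ∧ k ≤ cs.length ∧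
        cs.take k = pe.drop (pe.length - k) := by
  unfold aScan
  rw [List.any_eq_true]
  constructor
  · rintro ⟨L, hL, hP⟩
    rw [PySem.List.mem_pyRange_one] at hL
    obtain ⟨h50, hlt⟩ := hL
    obtain ⟨k, rfl⟩ : ∃ k : Nat, L = (k : Int) := ⟨L.toNat, by omega⟩
    refine ⟨k, by omega, by omega, by omega, ?_⟩
    rw [PySem.List.slice_from_neg_natCast pe k (by omega),
        PySem.List.slice_to cs (by omega), beq_iff_eq] at hP
    simpa using hP.symm
  · rintro ⟨k, h50, h2, h3, hm⟩
    refine ⟨(k : Int), ?_, ?_⟩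
    · rw [PySem.List.mem_pyRange_one]
      omega
    · rw [PySem.List.slice_from_neg_natCast pe k (by omega),
          PySem.List.slice_to cs (by omega), beq_iff_eq]
      simpa using hm.symm

lemma aScan_eq_bScan (pe cs : List Char) : aScan pe cs = bScan cs pe := by
  exact Bool.eq_iff_iff.mpr ((aScan_iff pe cs).trans (bScan_iff cs pe).symm)

-- ===== VERDICT (by name: the statement is the Claim_ definition above) =====
theorem is_content_already_included_spec : Claim_equal_is_content_already_included := by
  intro p c m _
  unfold Spec_is_content_already_included is_content_already_included is_content_already_included_alt
  split
  · rfl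
  · exact aScan_eq_bScan _ _
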